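-- pv_equiv track=rewrite | github.com/mpunkenhofer/aoc | aoc2022/src/day10.py | eval_prog
-- ===== SOURCE A (Python) =====
-- from typing import Tuple
--
-- def eval_prog(lines: list[str]) -> list[Tuple[int, int]]:
--     register_values = [(1, 0)]
--     cycle = 1
--
--     for line in lines:
--         values = line.split()
--
--         if (len(values) == 2):
--             op, v = values[0], int(values[1])
--
--             if op == "addx":
--                 cycle += 2
--                 register_values.append((register_values[-1][0] + v, cycle))
--         else:
--             cycle += 1
--
--     return register_values
-- ===== SOURCE B (Python) =====
-- from typing import Tuple
--
-- def eval_prog(lines: list[str]) -> list[Tuple[int, int]]: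
--     # Pass 1: parse, tracking only the cycle counter; record (delta, cycle) per addx.
--     deltas = []
--     cycle = 1
--     for line in lines:
--         toks = line.split()
--         if len(toks) != 2:
--             cycle += 1
--         elif toks[0] == "addx":
--             cycle += 2
--             deltas.append((int(toks[1]), cycle))
--     # Pass 2: prefix sums of the deltas give the register history.
--     regs = [1]
--     for d, _ in deltas:
--         regs.append(regs[-1] + d)
--     return [(1, 0)] + list(zip(regs[1:], (c for _, c in deltas)))
-- ===== Notes on version B (the rewrite author's own statement) =====
-- stated objective: alternative
-- what changed: A interleaves register bookkeeping with parsing in one loop reading the list's last element; B is a two-stage pipeline: a parse pass that records only (delta, cycle) pairs for addx lines, then a prefix-sum pass over the deltas zipped with the recorded cycles.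
import Mathlib
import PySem

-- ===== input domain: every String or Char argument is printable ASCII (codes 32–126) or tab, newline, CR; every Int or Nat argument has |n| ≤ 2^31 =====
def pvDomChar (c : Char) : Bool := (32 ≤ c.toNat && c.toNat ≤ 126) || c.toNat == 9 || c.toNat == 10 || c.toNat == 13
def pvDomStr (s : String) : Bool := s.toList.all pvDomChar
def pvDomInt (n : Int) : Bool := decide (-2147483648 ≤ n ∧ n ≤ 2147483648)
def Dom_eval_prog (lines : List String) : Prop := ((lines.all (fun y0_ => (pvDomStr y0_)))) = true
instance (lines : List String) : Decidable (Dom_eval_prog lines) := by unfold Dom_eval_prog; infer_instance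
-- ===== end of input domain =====

-- B replaces A's single loop (running register list + cycle bookkeeping) by a parse pass
-- collecting (delta, cycle) pairs followed by a prefix-sum/zip pass: alternative decomposition.


-- ===== PORT A =====
def eval_prog (lines : List String) : List (Int × Int) :=
  (lines.foldl (fun (st : List (Int × Int) × Int) line =>
    let rv := st.1
    let cycle := st.2
    let values := PySem.Str.split₀ line
    if values.length = 2 then
      let op := (PySem.List.pyGet? values 0).getD ""
      let v := (PySem.Int.ofStr? ((PySem.List.pyGet? values 1).getD "")).getD 0
      if op = "addx" then
        (rv ++ [(((PySem.List.pyGet? rv (-1)).getD (0, 0)).1 + v, cycle + 2)], cycle + 2)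
      else (rv, cycle)
    else (rv, cycle + 1)) ([(1, 0)], 1)).1

-- ===== PORT B =====
def eval_prog_alt (lines : List String) : List (Int × Int) :=
  let p := lines.foldl (fun (st : List (Int × Int) × Int) line =>
    let deltas := st.1
    let cycle := st.2
    let toks := PySem.Str.split₀ line
    if toks.length ≠ 2 then (deltas, cycle + 1)
    else if (PySem.List.pyGet? toks 0).getD "" = "addx" then
      (deltas ++ [((PySem.Int.ofStr? ((PySem.List.pyGet? toks 1).getD "")).getD 0, cycle + 2)], cycle + 2)
    else (deltas, cycle)) ([], 1)
  let deltas := p.1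
  let regs := deltas.foldl (fun (regs : List Int) dc =>
    regs ++ [((PySem.List.pyGet? regs (-1)).getD 1) + dc.1]) [1]
  (1, 0) :: (regs.drop 1).zip (deltas.map Prod.snd)

-- ===== PRECONDITION & SPEC =====
-- Pre_ excludes exactly the inputs where Python A raises ValueError: a two-token line whose
-- second token is not int-parsable (A calls int() on every two-token line).
def Pre_eval_prog (lines : List String) : Prop :=
  ∀ l ∈ lines, (PySem.Str.split₀ l).length = 2 →
    (PySem.Int.ofStr? ((PySem.List.pyGet? (PySem.Str.split₀ l) 1).getD "")).isSome = true
instance (lines : List String) : Decidable (Pre_eval_prog lines) := by unfold Pre_eval_prog; infer_instance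
def pvWitness_eval_prog : List String := ["noop", "addx 3", "", "addx -5"]

def Spec_eval_prog (lines : List String) (out : List (Int × Int)) : Prop := out = eval_prog_alt lines
instance (lines : List String) (out : List (Int × Int)) : Decidable (Spec_eval_prog lines out) := by unfold Spec_eval_prog; infer_instance

-- ===== CLAIM (what is proved, stated in full; the proofs are below) =====
def Claim_equal_eval_prog : Prop := ∀ (lines : List String), Dom_eval_prog lines → Pre_eval_prog lines → Spec_eval_prog lines (eval_prog lines)

-- ===== LEMMAS AND PROOFS =====

-- the common "value after all cycle updates" and the two loops' symbolic results
def pvCyc (c : Int) : List String → Int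
  | [] => c
  | l :: ls =>
    let ts := PySem.Str.split₀ l
    if ts.length = 2 then
      if (PySem.List.pyGet? ts 0).getD "" = "addx" then pvCyc (c + 2) ls
      else pvCyc c ls
    else pvCyc (c + 1) ls

def pvSpec (r c : Int) : List String → List (Int × Int)
  | [] => []
  | l :: ls =>
    let ts := PySem.Str.split₀ l
    if ts.length = 2 then
      if (PySem.List.pyGet? ts 0).getD "" = "addx" then
        let v := (PySem.Int.ofStr? ((PySem.List.pyGet? ts 1).getD "")).getD 0
        (r + v, c + 2) :: pvSpec (r + v) (c + 2) ls
      else pvSpec r c ls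
    else pvSpec r (c + 1) ls

def pvDeltas (c : Int) : List String → List (Int × Int)
  | [] => []
  | l :: ls =>
    let ts := PySem.Str.split₀ l
    if ts.length = 2 then
      if (PySem.List.pyGet? ts 0).getD "" = "addx" then
        ((PySem.Int.ofStr? ((PySem.List.pyGet? ts 1).getD "")).getD 0, c + 2) :: pvDeltas (c + 2) ls
      else pvDeltas c ls
    else pvDeltas (c + 1) ls

def pvRender (r : Int) : List (Int × Int) → List (Int × Int)
  | [] => []
  | (d, c) :: t => (r + d, c) :: pvRender (r + d) t

lemma pvFoldA (ls : List String) : ∀ (init : List (Int × Int)) (r k c : Int),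
    ls.foldl (fun (st : List (Int × Int) × Int) line =>
      let rv := st.1
      let cycle := st.2
      let values := PySem.Str.split₀ line
      if values.length = 2 then
        let op := (PySem.List.pyGet? values 0).getD ""
        let v := (PySem.Int.ofStr? ((PySem.List.pyGet? values 1).getD "")).getD 0
        if op = "addx" then
          (rv ++ [(((PySem.List.pyGet? rv (-1)).getD (0, 0)).1 + v, cycle + 2)], cycle + 2)
        else (rv, cycle)
      else (rv, cycle + 1)) (init ++ [(r, k)], c)
    = (init ++ (r, k) :: pvSpec r c ls, pvCyc c ls) := by
  induction ls with
  | nil => intro init r k c; simp [pvSpec, pvCyc]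
  | cons l ls ih =>
    intro init r k c
    rw [List.foldl_cons]
    by_cases h2 : (PySem.Str.split₀ l).length = 2
    · by_cases ha : (PySem.List.pyGet? (PySem.Str.split₀ l) 0).getD "" = "addx"
      · simp only [pvSpec, pvCyc, if_pos h2, if_pos ha,
          PySem.List.pyGet?_neg_one_append_singleton, Option.getD_some]
        rw [ih (init ++ [(r, k)])]
        simp
      · simp only [pvSpec, pvCyc, if_pos h2, if_neg ha]
        exact ih init r k c
    · simp only [pvSpec, pvCyc, if_neg h2]
      exact ih init r k (c + 1)

lemma pvFoldB (ls : List String) : ∀ (ds : List (Int × Int)) (c : Int),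
    ls.foldl (fun (st : List (Int × Int) × Int) line =>
      let deltas := st.1
      let cycle := st.2
      let toks := PySem.Str.split₀ line
      if toks.length ≠ 2 then (deltas, cycle + 1)
      else if (PySem.List.pyGet? toks 0).getD "" = "addx" then
        (deltas ++ [((PySem.Int.ofStr? ((PySem.List.pyGet? toks 1).getD "")).getD 0, cycle + 2)], cycle + 2)
      else (deltas, cycle)) (ds, c)
    = (ds ++ pvDeltas c ls, pvCyc c ls) := by
  induction ls with
  | nil => intro ds c; simp [pvDeltas, pvCyc]
  | cons l ls ih =>
    intro ds c
    rw [List.foldl_cons]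
    by_cases h2 : (PySem.Str.split₀ l).length = 2
    · by_cases ha : (PySem.List.pyGet? (PySem.Str.split₀ l) 0).getD "" = "addx"
      · simp only [pvDeltas, pvCyc, if_pos h2, if_pos ha, if_neg (by simp [h2] : ¬ (PySem.Str.split₀ l).length ≠ 2)]
        rw [ih]
        simp
      · simp only [pvDeltas, pvCyc, if_pos h2, if_neg ha, if_neg (by simp [h2] : ¬ (PySem.Str.split₀ l).length ≠ 2)]
        exact ih ds c
    · simp only [pvDeltas, pvCyc, if_neg h2, if_pos (by simp [h2] : (PySem.Str.split₀ l).length ≠ 2)]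
      exact ih ds (c + 1)

-- the register prefix sums B's second pass appends after its initial list
def pvRegs (x : Int) : List (Int × Int) → List Int
  | [] => []
  | (d, _) :: t => (x + d) :: pvRegs (x + d) t

lemma pvFoldR (ds : List (Int × Int)) : ∀ (a : List Int) (x : Int),
    ds.foldl (fun (regs : List Int) dc =>
      regs ++ [((PySem.List.pyGet? regs (-1)).getD 1) + dc.1]) (a ++ [x])
    = (a ++ [x]) ++ pvRegs x ds := by
  induction ds with
  | nil => intro a x; simp [pvRegs]
  | cons d ds ih =>
    intro a x
    obtain ⟨d, c⟩ := d
    rw [List.foldl_cons]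
    simp only [PySem.List.pyGet?_neg_one_append_singleton, Option.getD_some]
    rw [ih (a ++ [x]) (x + d)]
    simp [pvRegs]

lemma pvZipRegs (ds : List (Int × Int)) : ∀ (x : Int),
    (pvRegs x ds).zip (ds.map Prod.snd) = pvRender x ds := by
  induction ds with
  | nil => intro x; simp [pvRegs, pvRender]
  | cons d ds ih =>
    intro x
    obtain ⟨d, c⟩ := d
    simp [pvRegs, pvRender, ih]

lemma pvBridge (ls : List String) : ∀ (r c : Int), pvSpec r c ls = pvRender r (pvDeltas c ls) := by
  induction ls with
  | nil => intro r c; simp [pvSpec, pvDeltas, pvRender]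
  | cons l ls ih =>
    intro r c
    by_cases h2 : (PySem.Str.split₀ l).length = 2
    · by_cases ha : (PySem.List.pyGet? (PySem.Str.split₀ l) 0).getD "" = "addx"
      · simp only [pvSpec, pvDeltas, if_pos h2, if_pos ha, pvRender, ih]
      · simp only [pvSpec, pvDeltas, if_pos h2, if_neg ha, ih]
    · simp only [pvSpec, pvDeltas, if_neg h2, ih]

lemma pvA_eq (lines : List String) : eval_prog lines = (1, 0) :: pvSpec 1 1 lines := by
  unfold eval_prog
  have := pvFoldA lines [] 1 0 1
  simp only [List.nil_append] at this
  rw [this]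

lemma pvB_eq (lines : List String) : eval_prog_alt lines = (1, 0) :: pvRender 1 (pvDeltas 1 lines) := by
  unfold eval_prog_alt
  have hb := pvFoldB lines [] 1
  simp only [List.nil_append] at hb
  simp only [hb]
  have hr := pvFoldR (pvDeltas 1 lines) [] 1
  simp only [List.nil_append] at hr
  simp only [hr, List.singleton_append, List.drop_succ_cons, List.drop_zero, pvZipRegs]

-- ===== VERDICT (by name: the statement is the Claim_ definition above) =====
theorem eval_prog_spec : Claim_equal_eval_prog := by
  intro lines _ _
  unfold Spec_eval_prog
  rw [pvA_eq, pvB_eq, pvBridge]
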